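-- pv_equiv track=rewrite | github.com/AILab-FOI/APi | src/agents/tools/execution_plan.py | _clean_up_flow
-- ===== SOURCE A (Python) =====
-- def _clean_up_flow(flow: str, brackets: list[tuple[int, int]]) -> str:
--     """
--     Cleans up the flow
--     """
--
--     new_flow = flow
--     removed_chars = 0
--     for brackets_pair in brackets:
--         if isinstance(brackets_pair, tuple):
--             start, end = brackets_pair
--             new_flow = new_flow[: start - removed_chars] + new_flow[end - removed_chars + 1 :]
--             removed_chars = removed_chars + (end - start + 1)
--         else:
--             start = brackets_pair
--             new_flow = new_flow[: start - removed_chars] + new_flow[start - removed_chars + 1 :]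
--             removed_chars = removed_chars + 1
--
--     return new_flow
-- ===== SOURCE B (Python) =====
-- def _clean_up_flow(flow: str, brackets: list[tuple[int, int]]) -> str:
--     """Piece-table rewrite: keep (offset, length) segments of the original
--     string and split them per bracket; the string is materialised once at
--     the end instead of being copied for every bracket pair."""
--
--     def clamp(i, n):
--         if i < 0:
--             i += n
--         return 0 if i < 0 else (n if i > n else i)
--
--     def take(pieces, n):
--         out = []
--         for (o, l) in pieces:
--             if n <= l:
--                 out.append((o, n))
--                 return out
--             out.append((o, l))
--             n -= l
--         return out
--
--     def drop(pieces, n):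
--         for idx, (o, l) in enumerate(pieces):
--             if n < l:
--                 return [(o + n, l - n)] + pieces[idx + 1:]
--             n -= l
--         return []
--
--     pieces = [(0, len(flow))]
--     total = len(flow)
--     removed = 0
--     for start, end in brackets:
--         p = clamp(start - removed, total)
--         q = clamp(end - removed + 1, total)
--         pieces = take(pieces, p) + drop(pieces, q)
--         total = p + (total - q)
--         removed += end - start + 1
--     return ''.join(flow[o:o + l] for o, l in pieces)
-- ===== Notes on version B (the rewrite author's own statement) =====
-- stated objective: faster
-- what changed: Instead of rebuilding the whole string with two slices per bracket pair, B keeps a piece table of (offset, length) segments of the original string, splits pieces arithmetically per bracket, and materialises the result string once at the end.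
import Mathlib
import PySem

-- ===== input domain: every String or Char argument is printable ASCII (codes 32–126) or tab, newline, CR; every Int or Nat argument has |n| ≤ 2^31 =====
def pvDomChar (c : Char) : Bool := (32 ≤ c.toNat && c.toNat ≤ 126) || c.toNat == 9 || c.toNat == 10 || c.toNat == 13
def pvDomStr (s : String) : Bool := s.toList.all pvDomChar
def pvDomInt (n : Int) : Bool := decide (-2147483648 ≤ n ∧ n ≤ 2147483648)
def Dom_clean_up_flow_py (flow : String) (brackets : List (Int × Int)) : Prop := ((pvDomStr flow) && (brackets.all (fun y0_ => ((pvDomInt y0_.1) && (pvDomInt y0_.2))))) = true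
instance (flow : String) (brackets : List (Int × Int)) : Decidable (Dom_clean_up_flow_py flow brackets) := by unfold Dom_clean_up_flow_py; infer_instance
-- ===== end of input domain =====

-- B replaces A's per-bracket string re-slicing by a piece table ((offset,length) segments of the
-- original string) materialised once at the end; objective: faster when the string is much longer
-- than the bracket list (no full-string copy per bracket).


-- ===== PORT A =====
-- Literal port of A. Under the declared type list[tuple[int,int]] every element is a tuple,
-- so the `isinstance(brackets_pair, tuple)` test is always true and only that branch is ported.
def clean_up_flow_py (flow : String) (brackets : List (Int × Int)) : String :=
  let r := brackets.foldl
    (fun (st : List Char × Int) bp =>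
      (PySem.List.slice st.1 none (some (bp.1 - st.2)) ++
         PySem.List.slice st.1 (some (bp.2 - st.2 + 1)) none,
       st.2 + (bp.2 - bp.1 + 1)))
    (flow.toList, 0)
  String.ofList r.1

-- ===== PORT B =====
-- B-side helpers: pvClamp is Source B's `clamp`, pvTake / pvDrop are Source B's `take` / `drop`
-- (their loops over the piece list written as the same structural recursion).
def pvClamp (i : Int) (n : Nat) : Nat :=
  let i' := if i < 0 then i + n else i
  if i' < 0 then 0 else if i' > (n : Int) then n else i'.toNat

def pvTake : List (Nat × Nat) → Nat → List (Nat × Nat)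
  | [], _ => []
  | (o, l) :: ps, n => if n ≤ l then [(o, n)] else (o, l) :: pvTake ps (n - l)

def pvDrop : List (Nat × Nat) → Nat → List (Nat × Nat)
  | [], _ => []
  | (o, l) :: ps, n => if n < l then (o + n, l - n) :: ps else pvDrop ps (n - l)

def clean_up_flow_py_alt (flow : String) (brackets : List (Int × Int)) : String :=
  let cs := flow.toList
  let r := brackets.foldl
    (fun (st : List (Nat × Nat) × Nat × Int) bp =>
      let p := pvClamp (bp.1 - st.2.2) st.2.1
      let q := pvClamp (bp.2 - st.2.2 + 1) st.2.1
      (pvTake st.1 p ++ pvDrop st.1 q, p + (st.2.1 - q), st.2.2 + (bp.2 - bp.1 + 1)))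
    ([(0, cs.length)], cs.length, 0)
  String.ofList (r.1.flatMap (fun ol => (cs.drop ol.1).take ol.2))

-- ===== PRECONDITION & SPEC =====
def Spec_clean_up_flow_py (flow : String) (brackets : List (Int × Int)) (out : String) : Prop := out = clean_up_flow_py_alt flow brackets
instance (flow : String) (brackets : List (Int × Int)) (out : String) : Decidable (Spec_clean_up_flow_py flow brackets out) := by unfold Spec_clean_up_flow_py; infer_instance

-- ===== CLAIM (what is proved, stated in full; the proofs are below) =====
def Claim_equal_clean_up_flow_py : Prop := ∀ (flow : String) (brackets : List (Int × Int)), Dom_clean_up_flow_py flow brackets → Spec_clean_up_flow_py flow brackets (clean_up_flow_py flow brackets)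

-- ===== LEMMAS AND PROOFS =====

-- what a piece list denotes: the concatenation of its segments of cs
def pvRender (cs : List Char) (ps : List (Nat × Nat)) : List Char :=
  ps.flatMap (fun ol => (cs.drop ol.1).take ol.2)

-- all pieces lie inside cs
def pvInb (cs : List Char) (ps : List (Nat × Nat)) : Prop :=
  ∀ x ∈ ps, x.1 + x.2 ≤ cs.length

theorem pvClamp_eq_clampIdx (i : Int) (n : Nat) : pvClamp i n = PySem.List.clampIdx n i := by
  simp only [pvClamp, PySem.List.clampIdx]
  split_ifs <;> omega

theorem pvClamp_le (i : Int) (n : Nat) : pvClamp i n ≤ n := by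
  simp only [pvClamp]; split_ifs <;> omega

theorem pvSliceTo (xs : List Char) (b : Int) :
    PySem.List.slice xs none (some b) = xs.take (PySem.List.clampIdx xs.length b) := by
  simp [PySem.List.slice]

theorem pvLenPiece (cs : List Char) (o l : Nat) (h : o + l ≤ cs.length) :
    ((cs.drop o).take l).length = l := by
  simp; omega

theorem pvRender_take (cs : List Char) (ps : List (Nat × Nat)) (n : Nat)
    (hb : pvInb cs ps) : pvRender cs (pvTake ps n) = (pvRender cs ps).take n := by
  induction ps generalizing n with
  | nil => simp [pvRender, pvTake]
  | cons hd tl ih =>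
    obtain ⟨o, l⟩ := hd
    have hol : o + l ≤ cs.length := hb (o, l) (by simp)
    have hlen := pvLenPiece cs o l hol
    by_cases h : n ≤ l
    · simp only [pvTake, if_pos h, pvRender, List.flatMap_cons, List.flatMap_nil,
        List.append_nil, List.take_append, hlen, List.take_take]
      have : n - l = 0 := by omega
      simp [this, Nat.min_eq_left h]
    · have ihr := ih (n - l) (fun x hx => hb x (by simp [hx]))
      simp only [pvRender] at ihr ⊢
      simp only [pvTake, if_neg h, List.flatMap_cons, List.take_append, hlen]
      rw [ihr, List.take_take, Nat.min_eq_right (by omega)]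

theorem pvRender_drop (cs : List Char) (ps : List (Nat × Nat)) (n : Nat)
    (hb : pvInb cs ps) : pvRender cs (pvDrop ps n) = (pvRender cs ps).drop n := by
  induction ps generalizing n with
  | nil => simp [pvRender, pvDrop]
  | cons hd tl ih =>
    obtain ⟨o, l⟩ := hd
    have hol : o + l ≤ cs.length := hb (o, l) (by simp)
    have hlen := pvLenPiece cs o l hol
    by_cases h : n < l
    · simp only [pvDrop, if_pos h, pvRender, List.flatMap_cons, List.drop_append, hlen]
      have h1 : List.drop n ((cs.drop o).take l) = (cs.drop (o + n)).take (l - n) := by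
        rw [List.drop_take, List.drop_drop]
      have h2 : n - l = 0 := by omega
      rw [h1, h2]
      simp
    · have ihr := ih (n - l) (fun x hx => hb x (by simp [hx]))
      simp only [pvRender] at ihr ⊢
      simp only [pvDrop, if_neg h, List.flatMap_cons, List.drop_append, hlen]
      rw [ihr, List.drop_take, show l - n = 0 by omega]
      simp

theorem pvInb_take (cs : List Char) (ps : List (Nat × Nat)) (n : Nat)
    (hb : pvInb cs ps) : pvInb cs (pvTake ps n) := by
  induction ps generalizing n with
  | nil => simp [pvTake, pvInb]
  | cons hd tl ih =>
    obtain ⟨o, l⟩ := hd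
    have hol : o + l ≤ cs.length := hb (o, l) (by simp)
    intro x hx
    by_cases h : n ≤ l
    · simp only [pvTake, if_pos h, List.mem_singleton] at hx
      subst hx; simp; omega
    · simp only [pvTake, if_neg h, List.mem_cons] at hx
      rcases hx with rfl | hx
      · exact hol
      · exact ih (n - l) (fun y hy => hb y (by simp [hy])) x hx

theorem pvInb_drop (cs : List Char) (ps : List (Nat × Nat)) (n : Nat)
    (hb : pvInb cs ps) : pvInb cs (pvDrop ps n) := by
  induction ps generalizing n with
  | nil => simp [pvDrop, pvInb]
  | cons hd tl ih =>
    obtain ⟨o, l⟩ := hd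
    have hol : o + l ≤ cs.length := hb (o, l) (by simp)
    intro x hx
    by_cases h : n < l
    · simp only [pvDrop, if_pos h, List.mem_cons] at hx
      rcases hx with rfl | hx
      · simp; omega
      · exact hb x (by simp [hx])
    · simp only [pvDrop, if_neg h] at hx
      exact ih (n - l) (fun y hy => hb y (by simp [hy])) x hx

-- the loop invariant, pushed through the whole bracket list
theorem pvLoop (cs : List Char) (brackets : List (Int × Int)) :
    ∀ (ps : List (Nat × Nat)) (total : Nat) (removed : Int) (nf : List Char),
    pvRender cs ps = nf → total = nf.length → pvInb cs ps →
    (pvRender cs (brackets.foldl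
        (fun (st : List (Nat × Nat) × Nat × Int) bp =>
          let p := pvClamp (bp.1 - st.2.2) st.2.1
          let q := pvClamp (bp.2 - st.2.2 + 1) st.2.1
          (pvTake st.1 p ++ pvDrop st.1 q, p + (st.2.1 - q), st.2.2 + (bp.2 - bp.1 + 1)))
        (ps, total, removed)).1
      = (brackets.foldl
        (fun (st : List Char × Int) bp =>
          (PySem.List.slice st.1 none (some (bp.1 - st.2)) ++
             PySem.List.slice st.1 (some (bp.2 - st.2 + 1)) none,
           st.2 + (bp.2 - bp.1 + 1)))
        (nf, removed)).1) := by
  induction brackets with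
  | nil => intro ps total removed nf hr ht hb; simpa using hr
  | cons bp rest ih =>
    intro ps total removed nf hr ht hb
    simp only [List.foldl_cons]
    set p := pvClamp (bp.1 - removed) total with hp
    set q := pvClamp (bp.2 - removed + 1) total with hq
    have hple : p ≤ total := pvClamp_le _ _
    have hqle : q ≤ total := pvClamp_le _ _
    have hrender : pvRender cs (pvTake ps p ++ pvDrop ps q)
        = PySem.List.slice nf none (some (bp.1 - removed)) ++
          PySem.List.slice nf (some (bp.2 - removed + 1)) none := by
      have : pvRender cs (pvTake ps p ++ pvDrop ps q)
          = pvRender cs (pvTake ps p) ++ pvRender cs (pvDrop ps q) := by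
        simp [pvRender]
      rw [this, pvRender_take cs ps p hb, pvRender_drop cs ps q hb, hr,
        pvSliceTo, PySem.List.slice_some_none, hp, hq,
        pvClamp_eq_clampIdx, pvClamp_eq_clampIdx, ht]
    have hinb : pvInb cs (pvTake ps p ++ pvDrop ps q) := by
      intro x hx
      rcases List.mem_append.mp hx with hx | hx
      · exact pvInb_take cs ps p hb x hx
      · exact pvInb_drop cs ps q hb x hx
    have hlen : p + (total - q)
        = (PySem.List.slice nf none (some (bp.1 - removed)) ++
           PySem.List.slice nf (some (bp.2 - removed + 1)) none).length := by
      rw [pvSliceTo, PySem.List.slice_some_none, List.length_append,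
        List.length_take, List.length_drop, ← pvClamp_eq_clampIdx, ← pvClamp_eq_clampIdx, ← ht]
      omega
    exact ih _ _ _ _ hrender hlen hinb

-- ===== VERDICT (by name: the statement is the Claim_ definition above) =====
theorem clean_up_flow_py_spec : Claim_equal_clean_up_flow_py := by
  intro flow brackets _
  show clean_up_flow_py flow brackets = clean_up_flow_py_alt flow brackets
  have h := pvLoop flow.toList brackets [(0, flow.toList.length)] flow.toList.length 0
      flow.toList (by simp [pvRender]) rfl (by intro x hx; simp at hx; simp [hx])
  simp only [pvRender] at h
  simp only [clean_up_flow_py, clean_up_flow_py_alt]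
  rw [h]
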